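-- pv_equiv track=rewrite | github.com/Port5053/36BWInf | 2. Runde/Aufgabe 1/sloppyInsert.py | check
-- ===== SOURCE A (Python) =====
-- def check(wall):
-- 	n = len(wall[0])
-- 	width = n*(n+1)//2
-- 	slits = [False] * width
--
-- 	for row in wall:
-- 		x = 0
-- 		for brick in row:
-- 			x += brick
-- 			if x < width:
-- 				if slits[x]:
-- 					return False
--
-- 				slits[x] = True
--
-- 	return True
-- ===== SOURCE B (Python) =====
-- def check(wall):
--     n = len(wall[0])
--     width = n * (n + 1) // 2
--     positions = []
--     for row in wall:
--         x = 0
--         for brick in row: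
--             x += brick
--             if x < width:
--                 positions.append(x)
--     positions.sort()
--     return all(p != q for p, q in zip(positions, positions[1:]))
-- ===== Notes on version B (the rewrite author's own statement) =====
-- stated objective: alternative
-- what changed: A direct-addresses a mutable boolean array of size width and returns False early on the first repeated slit position; B uses a sort-based duplicate check: it accumulates all guarded prefix-sum positions, sorts them, and returns whether every adjacent pair in the sorted list is distinct, with no marking array and no early return.
-- outside the precondition, e.g. on check([]): A raises IndexError, B raises IndexError; on check([[-1, 3]]): A returns False, B returns True
import Mathlib
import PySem

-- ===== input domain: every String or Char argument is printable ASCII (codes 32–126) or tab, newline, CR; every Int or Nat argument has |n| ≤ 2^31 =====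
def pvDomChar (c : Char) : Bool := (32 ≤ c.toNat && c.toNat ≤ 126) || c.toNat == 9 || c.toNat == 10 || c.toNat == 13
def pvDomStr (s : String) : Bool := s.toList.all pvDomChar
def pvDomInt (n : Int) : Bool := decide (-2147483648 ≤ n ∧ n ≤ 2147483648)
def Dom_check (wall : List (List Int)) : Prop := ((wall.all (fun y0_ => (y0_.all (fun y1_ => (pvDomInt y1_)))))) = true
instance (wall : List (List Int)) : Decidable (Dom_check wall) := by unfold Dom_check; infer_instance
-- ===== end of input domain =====

-- B replaces A's direct-addressed mutable slit array with early return by a sort-based duplicate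
-- check: collect all guarded slit positions, sort them, and test adjacent pairs (objective: alternative).

-- ===== PORT A =====
def checkInner (width : Int) (slits : List Bool) (x : Int) : List Int → Option (List Bool)
  | [] => some slits
  | brick :: rest =>
    let x' := x + brick
    if x' < width then
      if PySem.List.pyGetD slits x' false = true then none
      else checkInner width (PySem.List.pySetD slits x' true) x' rest
    else checkInner width slits x' rest

def checkRows (width : Int) (slits : List Bool) : List (List Int) → Bool
  | [] => true
  | row :: rows =>
    match checkInner width slits 0 row with
    | none => false
    | some slits' => checkRows width slits' rows

def check (wall : List (List Int)) : Bool :=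
  let n : Int := (PySem.List.pyGetD wall 0 []).length
  let width : Int := PySem.Int.floordiv (n * (n + 1)) 2
  checkRows width (List.replicate width.toNat false) wall

-- ===== PORT B =====
def check_alt (wall : List (List Int)) : Bool :=
  let n : Int := (PySem.List.pyGetD wall 0 []).length
  let width : Int := PySem.Int.floordiv (n * (n + 1)) 2
  let positions : List Int := wall.foldl (fun acc row =>
    (row.foldl (fun (p : List Int × Int) brick =>
        let x := p.2 + brick
        (if x < width then p.1 ++ [x] else p.1, x))
      (acc, 0)).1) []
  let s := PySem.List.sorted positions (fun x => x) false
  (s.zip (s.drop 1)).all (fun p => p.1 != p.2)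

-- ===== PRECONDITION & SPEC =====
-- Pre_ restricts to the task's natural domain: a non-empty wall (A raises IndexError on wall[0]
-- for an empty wall) in which no row's running prefix sum of brick widths goes negative; on a
-- negative prefix sum A either raises IndexError (below -width) or records the slit through
-- Python's negative-index wraparound, outside the task's natural domain of brick widths.
def Pre_check (wall : List (List Int)) : Prop :=
  wall ≠ [] ∧ ∀ row ∈ wall, ∀ k < row.length + 1, 0 ≤ (row.take k).sum
instance (wall : List (List Int)) : Decidable (Pre_check wall) := by unfold Pre_check; infer_instance

def pvWitness_check : List (List Int) := [[1, 2], [2, 1]]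

def Spec_check (wall : List (List Int)) (out : Bool) : Prop := out = check_alt wall
instance (wall : List (List Int)) (out : Bool) : Decidable (Spec_check wall out) := by unfold Spec_check; infer_instance

-- ===== CLAIM (what is proved, stated in full; the proofs are below) =====
def Claim_equal_check : Prop := ∀ (wall : List (List Int)), Dom_check wall → Pre_check wall → Spec_check wall (check wall)

-- ===== LEMMAS AND PROOFS =====

-- the list of guarded internal slit positions of one row, starting from prefix sum x
def posFrom (width x : Int) : List Int → List Int
  | [] => []
  | b :: r => if x + b < width then (x + b) :: posFrom width (x + b) r else posFrom width (x + b) r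

-- A's marking loop, abstracted over the flat list of positions
def mark (slits : List Bool) : List Int → Option (List Bool)
  | [] => some slits
  | p :: ps =>
    if PySem.List.pyGetD slits p false = true then none
    else mark (PySem.List.pySetD slits p true) ps

lemma checkInner_eq_mark (row : List Int) : ∀ (width : Int) (slits : List Bool) (x : Int),
    checkInner width slits x row = mark slits (posFrom width x row) := by
  induction row with
  | nil => intro width slits x; rfl
  | cons b r ih =>
    intro width slits x
    simp only [checkInner, posFrom]
    split_ifs with h1 h2
    · simp only [mark, if_pos h2]
    · simp only [mark, if_neg h2]
      exact ih width _ (x + b)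
    · exact ih width slits (x + b)

lemma mark_append (a b : List Int) : ∀ slits,
    mark slits (a ++ b) = (mark slits a).bind (fun s => mark s b) := by
  induction a with
  | nil => intro slits; rfl
  | cons p ps ih =>
    intro slits
    simp only [List.cons_append, mark]
    split_ifs with h
    · rfl
    · exact ih _

lemma checkRows_eq (rows : List (List Int)) : ∀ (width : Int) (slits : List Bool),
    checkRows width slits rows = (mark slits (rows.flatMap (posFrom width 0))).isSome := by
  induction rows with
  | nil => intro width slits; rfl
  | cons row rest ih =>
    intro width slits
    simp only [checkRows, List.flatMap_cons, mark_append]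
    cases h : checkInner width slits 0 row with
    | none => rw [checkInner_eq_mark] at h; simp [h]
    | some s => rw [checkInner_eq_mark] at h; simp [h, ih]

lemma getD_set_self (l : List Bool) (n : Nat) (h : n < l.length) (v : Bool) :
    (l.set n v).getD n false = v := by
  simp [List.getD_eq_getElem?_getD, List.getElem?_set_self h]

lemma getD_set_ne (l : List Bool) (m n : Nat) (h : n ≠ m) (v : Bool) :
    (l.set n v).getD m false = l.getD m false := by
  simp [List.getD_eq_getElem?_getD, List.getElem?_set_ne h]

lemma mark_some_iff (ps : List Int) : ∀ slits : List Bool,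
    (∀ p ∈ ps, 0 ≤ p ∧ p < (slits.length : Int)) →
    ((mark slits ps).isSome = true ↔ ps.Nodup ∧ ∀ p ∈ ps, slits.getD p.toNat false = false) := by
  induction ps with
  | nil => intro slits _; simp [mark]
  | cons p ps ih =>
    intro slits hb
    obtain ⟨hp0, hpl⟩ := hb p (List.mem_cons_self ..)
    have hget : PySem.List.pyGetD slits p false = slits.getD p.toNat false := by
      rw [PySem.List.pyGetD_eq_getElem slits false hp0 hpl,
        List.getD_eq_getElem _ _ (by omega)]
    simp only [mark, hget]
    split_ifs with h
    · simp only [Option.isSome_none, Bool.false_eq_true, false_iff, not_and]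
      intro _ hall
      have hf := hall p (List.mem_cons_self ..)
      rw [hf] at h
      simp at h
    · rw [PySem.List.pySetD_of_nonneg slits true hp0]
      rw [ih (slits.set p.toNat true)
        (fun q hq => by
          have := hb q (List.mem_cons_of_mem _ hq)
          simpa [List.length_set] using this)]
      have hqp : ∀ q ∈ ps, 0 ≤ q → (q = p ↔ q.toNat = p.toNat) := by
        intro q _ hq0; omega
      constructor
      · rintro ⟨hnd, hall⟩
        have hnp : p ∉ ps := by
          intro hmem
          have := hall p hmem
          rw [getD_set_self _ _ (by omega)] at this
          exact absurd this (by simp)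
        refine ⟨List.nodup_cons.mpr ⟨hnp, hnd⟩, ?_⟩
        intro q hq
        rcases List.mem_cons.mp hq with rfl | hq'
        · simpa using h
        · have hq0 := (hb q (List.mem_cons_of_mem _ hq')).1
          have hne : p.toNat ≠ q.toNat := by
            intro he
            exact hnp (by have := (hqp q hq' hq0).mpr he.symm; exact this ▸ hq')
          have := hall q hq'
          rwa [getD_set_ne _ _ _ hne] at this
      · rintro ⟨hnd, hall⟩
        obtain ⟨hnp, hnd'⟩ := List.nodup_cons.mp hnd
        refine ⟨hnd', ?_⟩
        intro q hq'
        have hq0 := (hb q (List.mem_cons_of_mem _ hq')).1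
        have hne : p.toNat ≠ q.toNat := by
          intro he
          exact hnp (by have := (hqp q hq' hq0).mpr he.symm; exact this ▸ hq')
        rw [getD_set_ne _ _ _ hne]
        exact hall q (List.mem_cons_of_mem _ hq')

lemma posFrom_bounds (width : Int) (row : List Int) : ∀ x : Int,
    (∀ k : Nat, 0 ≤ x + (row.take k).sum) →
    ∀ p ∈ posFrom width x row, 0 ≤ p ∧ p < width := by
  induction row with
  | nil => intro x _ p hp; simp [posFrom] at hp
  | cons b r ih =>
    intro x hx p hp
    have hxb : ∀ k : Nat, 0 ≤ (x + b) + (r.take k).sum := by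
      intro k
      have := hx (k + 1)
      simpa [List.take_succ_cons, add_assoc] using this
    simp only [posFrom] at hp
    split_ifs at hp with h1
    · rcases List.mem_cons.mp hp with rfl | hp'
      · exact ⟨by simpa using hxb 0, h1⟩
      · exact ih (x + b) hxb p hp'
    · exact ih (x + b) hxb p hp

lemma b_row_foldl (width : Int) (row : List Int) : ∀ (acc : List Int) (x : Int),
    (row.foldl (fun (p : List Int × Int) brick =>
        (if p.2 + brick < width then p.1 ++ [p.2 + brick] else p.1, p.2 + brick)) (acc, x)).1
      = acc ++ posFrom width x row := by
  induction row with
  | nil => intro acc x; simp [posFrom]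
  | cons b r ih =>
    intro acc x
    simp only [List.foldl_cons, posFrom]
    split_ifs with h
    · rw [ih]; simp
    · rw [ih]

lemma b_positions (width : Int) (wall : List (List Int)) : ∀ init : List Int,
    wall.foldl (fun acc row =>
      (row.foldl (fun (p : List Int × Int) brick =>
          (if p.2 + brick < width then p.1 ++ [p.2 + brick] else p.1, p.2 + brick)) (acc, 0)).1) init
      = init ++ wall.flatMap (posFrom width 0) := by
  induction wall with
  | nil => intro init; simp
  | cons row rest ih =>
    intro init
    simp only [List.foldl_cons, List.flatMap_cons]
    rw [b_row_foldl, ih, List.append_assoc]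

-- on a (≤)-sorted list, "all adjacent pairs distinct" decides Nodup
lemma adj_all_iff_nodup (s : List Int) (hs : s.Pairwise (· ≤ ·)) :
    ((s.zip (s.drop 1)).all (fun p => p.1 != p.2) = true ↔ s.Nodup) := by
  induction s with
  | nil => simp
  | cons a t ih =>
    cases t with
    | nil => simp
    | cons b u =>
      have hab : a ≤ b := (List.pairwise_cons.mp hs).1 b (List.mem_cons_self ..)
      have ht : (b :: u).Pairwise (· ≤ ·) := (List.pairwise_cons.mp hs).2
      have hrec := ih ht
      simp only [List.drop_succ_cons, List.drop_zero, List.zip_cons_cons, List.all_cons,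
        Bool.and_eq_true, bne_iff_ne, ne_eq] at hrec ⊢
      rw [hrec]
      constructor
      · rintro ⟨hne, hnd⟩
        refine List.nodup_cons.mpr ⟨?_, hnd⟩
        intro hmem
        rcases List.mem_cons.mp hmem with rfl | hmem'
        · exact hne rfl
        · have hbu : ∀ y ∈ u, b ≤ y := fun y hy => (List.pairwise_cons.mp ht).1 y hy
          have := hbu a hmem'
          exact hne (le_antisymm hab this)
      · intro hnd
        obtain ⟨hna, hnd'⟩ := List.nodup_cons.mp hnd
        exact ⟨fun he => hna (he ▸ List.mem_cons_self ..), hnd'⟩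

-- ===== VERDICT (by name: the statement is the Claim_ definition above) =====
theorem check_spec : Claim_equal_check := by
  intro wall _ hpre
  unfold Spec_check check check_alt
  dsimp only
  obtain ⟨hne, hrows⟩ := hpre
  set n : Int := ((PySem.List.pyGetD wall 0 []).length : Int) with hn
  set W : Int := PySem.Int.floordiv (n * (n + 1)) 2 with hW
  have hn0 : (0 : Int) ≤ n := by rw [hn]; exact Int.natCast_nonneg _
  have hW0 : (0 : Int) ≤ W := by
    rw [hW, PySem.Int.floordiv_eq_ediv_of_pos (by norm_num)]
    exact Int.ediv_nonneg (mul_nonneg hn0 (by omega)) (by norm_num)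
  set PS : List Int := wall.flatMap (posFrom W 0) with hPS
  have hb : ∀ p ∈ PS, 0 ≤ p ∧ p < W := by
    intro p hp
    rw [hPS] at hp
    obtain ⟨row, hrow, hpr⟩ := List.mem_flatMap.mp hp
    have hk : ∀ k : Nat, 0 ≤ (0 : Int) + (row.take k).sum := by
      intro k
      by_cases hk' : k ≤ row.length
      · simpa using hrows row hrow k (by omega)
      · have ht : row.take k = row := List.take_of_length_le (by omega)
        rw [ht]
        have := hrows row hrow row.length (by omega)
        simpa using this
    exact posFrom_bounds W row 0 hk p hpr
  rw [checkRows_eq, b_positions, List.nil_append, ← hPS]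
  have hlen : ((List.replicate W.toNat false).length : Int) = W := by
    simp [Int.toNat_of_nonneg hW0]
  have hiff := mark_some_iff PS (List.replicate W.toNat false) (by rw [hlen]; exact hb)
  set S : List Int := PySem.List.sorted PS (fun x => x) false with hS
  have hsp : S.Pairwise (· ≤ ·) := by
    have := PySem.List.sorted_pairwise PS (fun x => x)
    simpa [hS] using this
  have hperm : S.Perm PS := PySem.List.sorted_perm PS (fun x => x) false
  rw [Bool.eq_iff_iff, hiff, adj_all_iff_nodup S hsp, hperm.nodup_iff]
  simp
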